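-- pv_equiv track=rewrite | github.com/ccandiotes/position-calculator | PositionCalculatorR4_5.py | _get_col_index_from_choice
-- ===== SOURCE A (Python) =====
-- from typing import List, Optional, Tuple, Dict
--
-- def _get_col_index_from_choice(choice: str) -> Optional[int]:
--     if not choice: return None
--     try:
--         letter = choice.split(":", 1)[0].strip()
--         idx = 0
--         for ch in letter:
--             idx = idx * 26 + (ord(ch.upper()) - ord('A') + 1)
--         return idx - 1
--     except Exception:
--         return None
-- ===== SOURCE B (Python) =====
-- def _get_col_index_from_choice(choice: str):
--     if not choice: return None
--     try:
--         letter = choice.split(":", 1)[0].strip()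
--         total, power = 0, 1
--         for ch in reversed(letter):
--             total += (ord(ch.upper()) - ord('A') + 1) * power
--             power *= 26
--         return total - 1
--     except Exception:
--         return None
-- ===== Notes on version B (the rewrite author's own statement) =====
-- stated objective: alternative
-- what changed: Replaces the left-to-right Horner accumulation (idx = idx*26 + digit) by a direct positional base-26 sum over the reversed letters with explicit powers 26**i.
import Mathlib
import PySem

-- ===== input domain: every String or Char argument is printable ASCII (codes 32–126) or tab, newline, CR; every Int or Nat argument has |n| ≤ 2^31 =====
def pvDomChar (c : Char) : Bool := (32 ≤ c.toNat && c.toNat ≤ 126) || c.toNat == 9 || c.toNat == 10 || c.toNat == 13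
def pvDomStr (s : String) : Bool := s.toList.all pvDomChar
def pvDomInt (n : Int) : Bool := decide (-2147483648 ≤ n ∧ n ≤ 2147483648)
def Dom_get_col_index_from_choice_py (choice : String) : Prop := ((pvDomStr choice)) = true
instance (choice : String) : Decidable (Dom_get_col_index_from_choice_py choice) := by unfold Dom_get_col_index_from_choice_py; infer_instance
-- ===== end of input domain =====

-- B replaces A's Horner accumulation by a direct positional base-26 sum over the
-- reversed letters with explicit powers (alternative decomposition, same cost).

-- shared by both Pythons verbatim: letter = choice.split(":", 1)[0].strip()
-- (split with a nonempty separator always returns a nonempty list, so the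
--  getD/headD defaults are unreachable; the try/except can never fire)
def pvLetter (choice : String) : String :=
  PySem.Str.strip (((PySem.Str.splitMax? choice ":" 1).getD []).headD "")

-- shared digit value: ord(ch.upper()) - ord('A') + 1
def pvVal (c : Char) : Int := ((PySem.Chars.upperChar c).toNat : Int) - 65 + 1

-- ===== PORT A =====
def get_col_index_from_choice_py (choice : String) : Option Int :=
  if choice = "" then none
  else
    let letter := pvLetter choice
    let idx := letter.toList.foldl (fun idx ch => idx * 26 + pvVal ch) 0
    some (idx - 1)

-- ===== PORT B =====
-- the loop `for ch in reversed(letter): total += val(ch) * power; power *= 26`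
def pvPosSum : List Char → Int → Int → Int
  | [], total, _ => total
  | c :: rest, total, power => pvPosSum rest (total + pvVal c * power) (power * 26)

def get_col_index_from_choice_py_alt (choice : String) : Option Int :=
  if choice = "" then none
  else
    let letter := pvLetter choice
    some (pvPosSum letter.toList.reverse 0 1 - 1)

-- ===== PRECONDITION & SPEC =====
def Spec_get_col_index_from_choice_py (choice : String) (out : Option Int) : Prop := out = get_col_index_from_choice_py_alt choice
instance (choice : String) (out : Option Int) : Decidable (Spec_get_col_index_from_choice_py choice out) := by unfold Spec_get_col_index_from_choice_py; infer_instance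

-- ===== CLAIM (what is proved, stated in full; the proofs are below) =====
def Claim_equal_get_col_index_from_choice_py : Prop := ∀ (choice : String), Dom_get_col_index_from_choice_py choice → Spec_get_col_index_from_choice_py choice (get_col_index_from_choice_py choice)

-- ===== LEMMAS AND PROOFS =====

-- positional sum at running place value = Horner value of the reversed digits, scaled
theorem pvPosSum_eq_horner (cs : List Char) (total power : Int) :
    pvPosSum cs total power
      = total + (cs.reverse.foldl (fun acc c => acc * 26 + pvVal c) 0) * power := by
  induction cs generalizing total power with
  | nil => simp [pvPosSum]
  | cons c rest ih =>
    simp only [pvPosSum, List.reverse_cons, List.foldl_append, List.foldl_cons, List.foldl_nil,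
      ih]
    ring

-- ===== VERDICT (by name: the statement is the Claim_ definition above) =====
theorem get_col_index_from_choice_py_spec : Claim_equal_get_col_index_from_choice_py := by
  intro choice _
  unfold Spec_get_col_index_from_choice_py get_col_index_from_choice_py get_col_index_from_choice_py_alt
  by_cases h : choice = "" <;> simp [h, pvPosSum_eq_horner]
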